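-- pv_equiv track=rewrite | github.com/SajjadMazhar/Codewars-kata-solutions | arrayoftiers.py | create_array_of_tiers
-- ===== SOURCE A (Python) =====
-- def create_array_of_tiers(n):
--     num=[]
--     while n>0:
--         num.append(n)
--         n=n//10
--     num.sort()
--     num=list(map(str, num))
--
--     return num
-- ===== SOURCE B (Python) =====
-- def create_array_of_tiers(n):
--     if n <= 0:
--         return []
--     s = str(n)
--     return [s[:i] for i in range(1, len(s) + 1)]
-- ===== Notes on version B (the rewrite author's own statement) =====
-- stated objective: idiomatic
-- what changed: B builds the result as the increasing decimal-string prefixes of str(n) by slicing, instead of A's repeated integer division loop followed by a sort and a str map.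
import Mathlib
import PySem

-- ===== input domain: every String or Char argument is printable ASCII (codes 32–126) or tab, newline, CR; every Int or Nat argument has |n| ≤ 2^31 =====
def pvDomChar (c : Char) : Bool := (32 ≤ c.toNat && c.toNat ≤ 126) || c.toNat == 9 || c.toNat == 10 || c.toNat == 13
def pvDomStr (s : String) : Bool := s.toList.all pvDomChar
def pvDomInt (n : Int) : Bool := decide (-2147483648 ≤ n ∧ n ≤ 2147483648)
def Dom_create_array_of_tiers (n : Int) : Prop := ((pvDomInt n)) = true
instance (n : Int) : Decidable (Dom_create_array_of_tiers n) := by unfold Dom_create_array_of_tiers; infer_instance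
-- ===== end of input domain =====

-- B replaces A's divide-by-10 loop + sort + str map by the increasing decimal-string
-- prefixes of str(n), taken by slicing (idiomatic; same cost).

-- ===== PORT A =====
-- while n > 0: num.append(n); n = n // 10
def pvLoopA (n : Int) (num : List Int) : List Int :=
  if _h : 0 < n then pvLoopA (PySem.Int.floordiv n 10) (num ++ [n]) else num
termination_by n.toNat
decreasing_by simp only [PySem.Int.floordiv, Int.fdiv_eq_ediv]; omega

def create_array_of_tiers (n : Int) : List String :=
  let num := pvLoopA n []
  let num := PySem.List.sorted num (fun x => x)
  num.map PySem.Int.toStr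

-- ===== PORT B =====
def create_array_of_tiers_alt (n : Int) : List String :=
  if n ≤ 0 then []
  else
    let s := PySem.Int.toStr n
    (PySem.List.pyRange 1 (PySem.Str.len s + 1) 1).map (fun i => PySem.Str.slice s none (some i))

-- ===== PRECONDITION & SPEC =====
def Spec_create_array_of_tiers (n : Int) (out : List String) : Prop := out = create_array_of_tiers_alt n
instance (n : Int) (out : List String) : Decidable (Spec_create_array_of_tiers n out) := by unfold Spec_create_array_of_tiers; infer_instance

-- ===== CLAIM (what is proved, stated in full; the proofs are below) =====
def Claim_equal_create_array_of_tiers : Prop := ∀ (n : Int), Dom_create_array_of_tiers n → Spec_create_array_of_tiers n (create_array_of_tiers n)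

-- ===== LEMMAS AND PROOFS =====

-- the tiers n, n//10, n//100, … (descending), as A's loop produces them
def pvTiers (n : Int) : List Int :=
  if _h : 0 < n then n :: pvTiers (PySem.Int.floordiv n 10) else []
termination_by n.toNat
decreasing_by simp only [PySem.Int.floordiv, Int.fdiv_eq_ediv]; omega

theorem pvLoopA_eq (n : Int) : ∀ acc, pvLoopA n acc = acc ++ pvTiers n := by
  induction n using pvTiers.induct with
  | case1 n h ih =>
      intro acc
      conv_rhs => rw [pvTiers, dif_pos h]
      rw [pvLoopA, dif_pos h, ih]
      simp
  | case2 n h =>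
      intro acc
      rw [pvLoopA, pvTiers]; simp [h]

theorem pvTiers_mem_le (n : Int) : ∀ m ∈ pvTiers n, 0 < m ∧ m ≤ n := by
  induction n using pvTiers.induct with
  | case1 n h ih =>
      rw [pvTiers]; simp only [h, dif_pos, List.mem_cons]
      rintro m (rfl | hm)
      · exact ⟨h, le_refl _⟩
      · obtain ⟨h1, h2⟩ := ih m hm
        refine ⟨h1, le_trans h2 ?_⟩
        simp only [PySem.Int.floordiv, Int.fdiv_eq_ediv]; omega
  | case2 n h => rw [pvTiers]; simp [h]

theorem pvTiers_pairwise (n : Int) : (pvTiers n).Pairwise (fun a b => b < a) := by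
  induction n using pvTiers.induct with
  | case1 n h ih =>
      rw [pvTiers]; simp only [h, dif_pos, List.pairwise_cons]
      refine ⟨fun m hm => ?_, ih⟩
      obtain ⟨_, h2⟩ := pvTiers_mem_le _ m hm
      have : PySem.Int.floordiv n 10 < n := by
        simp only [PySem.Int.floordiv, Int.fdiv_eq_ediv]; omega
      omega
  | case2 n h => rw [pvTiers]; simp [h]

theorem sorted_pvTiers (n : Int) :
    PySem.List.sorted (pvTiers n) (fun x => x) = (pvTiers n).reverse := by
  apply PySem.List.sorted_eq_of_perm_of_pairwise_lt
  · exact (pvTiers n).reverse_perm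
  · rw [List.pairwise_reverse]
    exact pvTiers_pairwise n

-- decimal digits of a positive Nat, most significant first
def pvRep (n : Nat) : List Char :=
  if n < 10 then [Nat.digitChar n] else pvRep (n / 10) ++ [Nat.digitChar (n % 10)]
termination_by n
decreasing_by omega

theorem toDigitsCore_eq_pvRep : ∀ (n f : Nat) (acc : List Char), n < f →
    Nat.toDigitsCore 10 f n acc = pvRep n ++ acc := by
  intro n
  induction n using Nat.strong_induction_on with
  | _ n ih =>
      intro f acc hf
      match f with
      | 0 => omega
      | f + 1 =>
        simp only [Nat.toDigitsCore]
        by_cases h10 : n < 10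
        · have hz : n / 10 = 0 := by omega
          rw [if_pos hz, pvRep, if_pos h10, (by omega : n % 10 = n)]
          simp
        · have hz : ¬ (n / 10 = 0) := by omega
          have hrep : pvRep n = pvRep (n / 10) ++ [Nat.digitChar (n % 10)] := by
            rw [pvRep, if_neg h10]
          rw [if_neg hz, ih (n / 10) (by omega) f (Nat.digitChar (n % 10) :: acc) (by omega), hrep]
          simp

theorem toChars_pos (n : Int) (h : 0 < n) : PySem.Int.toChars n = pvRep n.toNat := by
  simp only [PySem.Int.toChars, if_neg (by omega : ¬ n < 0), Nat.toDigits]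
  simpa using toDigitsCore_eq_pvRep n.toNat (n.toNat + 1) [] (by omega)

theorem pvRep_fdiv (n : Int) (h : 10 ≤ n) :
    pvRep n.toNat = pvRep (PySem.Int.floordiv n 10).toNat ++ [Nat.digitChar (n.toNat % 10)] := by
  have h1 : (PySem.Int.floordiv n 10).toNat = n.toNat / 10 := by
    simp only [PySem.Int.floordiv, Int.fdiv_eq_ediv]; omega
  rw [h1, pvRep, if_neg (by omega : ¬ n.toNat < 10)]

theorem pvRep_small (n : Int) (h1 : 0 < n) (h2 : n < 10) : (pvRep n.toNat).length = 1 := by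
  rw [pvRep]; simp [(by omega : n.toNat < 10)]

-- the central lemma: A's tiers, reversed and rendered, are the decimal prefixes of str(n)
theorem tiers_eq_prefixes (n : Int) (h : 0 < n) :
    (pvTiers n).reverse.map PySem.Int.toStr =
      (List.range (PySem.Int.toChars n).length).map
        (fun k => String.ofList ((PySem.Int.toChars n).take (k + 1))) := by
  induction n using pvTiers.induct with
  | case2 n hn => omega
  | case1 n hn ih =>
      by_cases h10 : n < 10
      · have hz : ¬ 0 < PySem.Int.floordiv n 10 := by
          simp only [PySem.Int.floordiv, Int.fdiv_eq_ediv]; omega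
        have hlen : (PySem.Int.toChars n).length = 1 := by
          rw [toChars_pos n hn]; exact pvRep_small n hn h10
        rw [pvTiers, dif_pos hn, pvTiers, dif_neg hz, hlen]
        simp only [List.range_one, List.reverse_cons, List.reverse_nil, List.nil_append,
          List.map_cons, List.map_nil]
        have ht : (PySem.Int.toChars n).take (0 + 1) = PySem.Int.toChars n := by
          rw [← hlen]; simp
        rw [ht, ← PySem.Int.toList_toStr, String.ofList_toList]
      · have hm : 0 < PySem.Int.floordiv n 10 := by
          simp only [PySem.Int.floordiv, Int.fdiv_eq_ediv]; omega
        set m := PySem.Int.floordiv n 10 with hmdef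
        have hsplit : PySem.Int.toChars n = PySem.Int.toChars m ++ [Nat.digitChar (n.toNat % 10)] := by
          rw [toChars_pos n hn, toChars_pos m hm, hmdef, pvRep_fdiv n (by omega)]
        rw [pvTiers]
        simp only [hn, dif_pos, ← hmdef, List.reverse_cons, List.map_append, List.map_cons,
          List.map_nil]
        rw [ih hm, hsplit]
        set cs := PySem.Int.toChars m with hcs
        rw [List.length_append, List.length_singleton, List.range_succ, List.map_append]
        congr 1
        · apply List.map_congr_left
          intro k hk
          rw [List.mem_range] at hk
          rw [List.take_append_of_le_length (by omega)]
        · simp only [List.map_cons, List.map_nil]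
          have : (cs ++ [Nat.digitChar (n.toNat % 10)]).take (cs.length + 1) =
              cs ++ [Nat.digitChar (n.toNat % 10)] := by
            apply List.take_of_length_le; simp
          rw [this, ← hsplit, ← PySem.Int.toList_toStr, String.ofList_toList]

theorem alt_pos (n : Int) (h : 0 < n) :
    create_array_of_tiers_alt n =
      (List.range (PySem.Int.toChars n).length).map
        (fun k => String.ofList ((PySem.Int.toChars n).take (k + 1))) := by
  rw [create_array_of_tiers_alt, if_neg (by omega : ¬ n ≤ 0)]
  simp only [PySem.List.pyRange_one, List.map_map, PySem.Str.len_eq, PySem.Int.toList_toStr]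
  rw [(by omega : ((PySem.Int.toChars n).length : Int) + 1 - 1 = ((PySem.Int.toChars n).length : Int))]
  rw [Int.toNat_natCast]
  apply List.map_congr_left
  intro k _
  simp only [Function.comp_apply]
  have h1 : (1 : Int) + (k : Int) = ((k + 1 : Nat) : Int) := by push_cast; ring
  apply String.ext  -- strings are equal iff their char lists are
  rw [PySem.Str.toList_slice]
  simp only [PySem.Chars.slice, h1, PySem.List.slice_to_natCast, PySem.Int.toList_toStr]
  rw [String.toList_ofList]

-- ===== VERDICT (by name: the statement is the Claim_ definition above) =====
theorem create_array_of_tiers_spec : Claim_equal_create_array_of_tiers := by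
  intro n _
  unfold Spec_create_array_of_tiers create_array_of_tiers
  simp only [pvLoopA_eq n [], List.nil_append, sorted_pvTiers]
  by_cases h : 0 < n
  · rw [List.map_reverse] at *
    rw [← List.map_reverse, tiers_eq_prefixes n h, alt_pos n h]
  · rw [pvTiers, dif_neg h, create_array_of_tiers_alt, if_pos (by omega)]
    simp
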